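-- pv_equiv track=rewrite | github.com/rauterfrank-ui/Peak_Trade | scripts/ops/check_docs_drift_guard.py | _any_sensitive_triggered
-- ===== SOURCE A (Python) =====
-- def _path_matches_sensitive(repo_rel: str, pattern: str) -> bool:
--     """Return True if repo-relative path matches a sensitive pattern."""
--     p = repo_rel.replace("\\", "/").strip()
--     if not p:
--         return False
--     if pattern.endswith("/"):
--         return p.startswith(pattern)
--     return p == pattern
--
-- def _any_sensitive_triggered(
--     changed: frozenset[str],
--     sensitive_patterns: list[str],
-- ) -> bool:
--     for pat in sensitive_patterns:
--         for ch in changed: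
--             if _path_matches_sensitive(ch, pat):
--                 return True
--     return False
-- ===== SOURCE B (Python) =====
-- def _any_sensitive_triggered(changed, sensitive_patterns):
--     # Inverted index: from each normalized changed path derive every pattern string
--     # that could match it (the path itself for exact matches, and each prefix ending
--     # at a '/' for directory patterns), then just test pattern membership.
--     keys = set()
--     for c in changed:
--         p = c.replace("\\", "/").strip()
--         if p:
--             keys.add(p)
--             for i, ch in enumerate(p):
--                 if ch == "/":
--                     keys.add(p[:i + 1])
--     return any(pat in keys for pat in sensitive_patterns)
-- ===== Notes on version B (the rewrite author's own statement) =====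
-- stated objective: alternative
-- what changed: A tests every (pattern, path) pair with per-pair normalization, equality and startswith; B inverts the matching: from each normalized path it derives the full set of pattern strings that could match it (the path itself plus each prefix ending at a '/') and then answers by plain membership of each pattern in that key set, with no prefix test at all.
import Mathlib
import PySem

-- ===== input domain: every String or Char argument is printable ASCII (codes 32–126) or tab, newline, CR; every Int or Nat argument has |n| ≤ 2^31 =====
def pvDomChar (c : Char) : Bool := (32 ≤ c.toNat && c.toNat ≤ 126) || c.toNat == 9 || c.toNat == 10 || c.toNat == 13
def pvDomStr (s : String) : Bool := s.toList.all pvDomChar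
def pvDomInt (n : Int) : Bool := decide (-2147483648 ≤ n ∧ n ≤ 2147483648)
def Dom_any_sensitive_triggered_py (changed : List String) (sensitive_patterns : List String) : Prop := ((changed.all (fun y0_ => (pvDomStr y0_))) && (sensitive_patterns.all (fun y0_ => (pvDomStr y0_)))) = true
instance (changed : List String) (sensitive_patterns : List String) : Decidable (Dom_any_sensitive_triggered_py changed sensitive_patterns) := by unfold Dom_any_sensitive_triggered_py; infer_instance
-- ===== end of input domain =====

-- B replaces A's pattern-by-path double loop (per-pair normalization, equality and startswith)
-- with an inverted index: each normalized changed path contributes every pattern string that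
-- could match it (itself, and each prefix ending at '/'); patterns are then tested by membership.


-- ===== PORT A =====
def pvPathMatchesSensitive (repo_rel : String) (pattern : String) : Bool :=
  let p := PySem.Str.strip (PySem.Str.replace repo_rel "\\" "/")
  if p = "" then false
  else if PySem.Str.endswith pattern "/" then PySem.Str.startswith p pattern
  else p = pattern

def any_sensitive_triggered_py (changed : List String) (sensitive_patterns : List String) : Bool :=
  sensitive_patterns.any (fun pat => changed.any (fun ch => pvPathMatchesSensitive ch pat))

-- ===== PORT B =====
def pvNormB (s : String) : String := PySem.Str.strip (PySem.Str.replace s "\\" "/")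

-- keys.add(p); then for i, ch in enumerate(p): if ch == '/': keys.add(p[:i+1])
def pvAddKeys (keys : PySem.Set String) (c : String) : PySem.Set String :=
  let p := pvNormB c
  if p = "" then keys
  else (PySem.List.enumerate p.toList 0).foldl
      (fun ks ic => if ic.2 = '/' then PySem.Set.add ks (PySem.Str.slice p none (some (ic.1 + 1))) else ks)
      (PySem.Set.add keys p)

def any_sensitive_triggered_py_alt (changed : List String) (sensitive_patterns : List String) : Bool :=
  let keys := changed.foldl pvAddKeys PySem.Set.empty
  sensitive_patterns.any (fun pat => PySem.Set.contains keys pat)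

-- ===== PRECONDITION & SPEC =====
def Spec_any_sensitive_triggered_py (changed : List String) (sensitive_patterns : List String) (out : Bool) : Prop := out = any_sensitive_triggered_py_alt changed sensitive_patterns
instance (changed : List String) (sensitive_patterns : List String) (out : Bool) : Decidable (Spec_any_sensitive_triggered_py changed sensitive_patterns out) := by unfold Spec_any_sensitive_triggered_py; infer_instance

-- ===== CLAIM (what is proved, stated in full; the proofs are below) =====
def Claim_equal_any_sensitive_triggered_py : Prop := ∀ (changed : List String) (sensitive_patterns : List String), Dom_any_sensitive_triggered_py changed sensitive_patterns → Spec_any_sensitive_triggered_py changed sensitive_patterns (any_sensitive_triggered_py changed sensitive_patterns)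

-- ===== LEMMAS AND PROOFS =====
-- A's matcher, phrased on the character lists of the normalized path and the raw pattern.
theorem pv_match_iff (ch pat : String) :
    pvPathMatchesSensitive ch pat = true ↔
      ((pvNormB ch).toList ≠ [] ∧
        ((['/'] <:+ pat.toList ∧ pat.toList <+: (pvNormB ch).toList) ∨
         (¬ ['/'] <:+ pat.toList ∧ pat.toList = (pvNormB ch).toList))) := by
  have hnil : (pvNormB ch = "") ↔ (pvNormB ch).toList = [] := by
    rw [← String.toList_inj]; simp
  have he : PySem.Str.endswith pat "/" = true ↔ ['/'] <:+ pat.toList := by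
    rw [PySem.Str.endswith_eq, PySem.Chars.endswith_iff,
      show ("/" : String).toList = ['/'] by decide]
  have hs : PySem.Str.startswith (pvNormB ch) pat = true ↔ pat.toList <+: (pvNormB ch).toList := by
    rw [PySem.Str.startswith_eq, PySem.Chars.startswith_iff]
  have hb : pvPathMatchesSensitive ch pat =
      (if pvNormB ch = "" then false
       else if PySem.Str.endswith pat "/" then PySem.Str.startswith (pvNormB ch) pat
       else decide (pvNormB ch = pat)) := rfl
  rw [hb]
  by_cases h0 : pvNormB ch = ""
  · simp [h0]
  · rw [if_neg h0]
    by_cases h1 : PySem.Str.endswith pat "/" = true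
    · rw [if_pos h1, hs]
      have h1' := he.mp h1
      constructor
      · intro hpre; exact ⟨fun h => h0 (hnil.mpr h), Or.inl ⟨h1', hpre⟩⟩
      · rintro ⟨-, ⟨-, hpre⟩ | ⟨hns, -⟩⟩
        · exact hpre
        · exact absurd h1' hns
    · rw [if_neg h1]
      have h1' : ¬ ['/'] <:+ pat.toList := fun h => h1 (he.mpr h)
      simp only [decide_eq_true_eq]
      constructor
      · intro heq
        exact ⟨fun h => h0 (hnil.mpr h), Or.inr ⟨h1', by rw [heq]⟩⟩
      · rintro ⟨-, ⟨hsuf, -⟩ | ⟨-, heq⟩⟩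
        · exact absurd hsuf h1'
        · exact (String.toList_inj.mp heq).symm

-- string equality with the slice p[:k+1], on the list side
theorem pv_slice_eq (p pat : String) (k : Nat) :
    pat = PySem.Str.slice p none (some ((k : Int) + 1)) ↔ pat.toList = p.toList.take (k + 1) := by
  rw [← String.toList_inj, PySem.Str.toList_slice, PySem.Chars.slice_eq_listSlice,
    show ((k : Int) + 1) = ((k + 1 : Nat) : Int) by push_cast; ring,
    PySem.List.slice_to_natCast]

-- candidate characterization: pat is the path itself or a '/'-terminated prefix of it
-- iff A's two match cases hold
theorem pv_cand_core (p pat : List Char) :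
    (pat = p ∨ ∃ k, ∃ _h : k < p.length, p[k] = '/' ∧ pat = p.take (k + 1)) ↔
    ((['/'] <:+ pat ∧ pat <+: p) ∨ (¬ ['/'] <:+ pat ∧ pat = p)) := by
  constructor
  · rintro (rfl | ⟨k, hk, hc, rfl⟩)
    · by_cases hsf : ['/'] <:+ pat
      · exact Or.inl ⟨hsf, List.prefix_refl _⟩
      · exact Or.inr ⟨hsf, rfl⟩
    · refine Or.inl ⟨?_, List.take_prefix _ _⟩
      have ht : p.take (k + 1) = p.take k ++ [p[k]] := by
        rw [List.take_add_one, List.getElem?_eq_getElem hk]; rfl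
      exact ⟨p.take k, by rw [ht, hc]⟩
  · rintro (⟨hsf, hpre⟩ | ⟨-, rfl⟩)
    · obtain ⟨t, ht⟩ := hsf
      obtain ⟨r, hr⟩ := hpre
      subst ht
      subst hr
      refine Or.inr ⟨t.length, by simp, ?_, ?_⟩
      · have hlt : t.length < (t ++ ['/']).length := by simp
        rw [List.getElem_append_left hlt, List.getElem_concat_length]
        rfl
      · rw [List.take_append_of_le_length (by simp), List.take_of_length_le (by simp)]
    · exact Or.inl rfl

-- membership in the inner fold over enumerate(p)
theorem pv_mem_inner (p : String) (l : List (Int × Char)) (s : PySem.Set String) (q : String) :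
    q ∈ l.foldl
        (fun ks ic => if ic.2 = '/' then PySem.Set.add ks (PySem.Str.slice p none (some (ic.1 + 1))) else ks) s
      ↔ q ∈ s ∨ ∃ ic ∈ l, ic.2 = '/' ∧ q = PySem.Str.slice p none (some (ic.1 + 1)) := by
  induction l generalizing s with
  | nil => simp
  | cons a l ih =>
    simp only [List.foldl_cons, List.mem_cons]
    by_cases h : a.2 = '/'
    · rw [if_pos h, ih, PySem.Set.mem_add]
      constructor
      · rintro ((hq | hq) | ⟨ic, hic, hc, hq⟩)
        · exact Or.inl hq
        · exact Or.inr ⟨a, Or.inl rfl, h, hq⟩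
        · exact Or.inr ⟨ic, Or.inr hic, hc, hq⟩
      · rintro (hq | ⟨ic, (rfl | hic), hc, hq⟩)
        · exact Or.inl (Or.inl hq)
        · exact Or.inl (Or.inr hq)
        · exact Or.inr ⟨ic, hic, hc, hq⟩
    · rw [if_neg h, ih]
      constructor
      · rintro (hq | ⟨ic, hic, hc, hq⟩)
        · exact Or.inl hq
        · exact Or.inr ⟨ic, Or.inr hic, hc, hq⟩
      · rintro (hq | ⟨ic, (rfl | hic), hc, hq⟩)
        · exact Or.inl hq
        · exact absurd hc h
        · exact Or.inr ⟨ic, hic, hc, hq⟩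

-- membership in the keys contributed by one changed entry = A's matcher firing on it
theorem pv_mem_addKeys (keys : PySem.Set String) (c q : String) :
    q ∈ pvAddKeys keys c ↔ q ∈ keys ∨ pvPathMatchesSensitive c q = true := by
  unfold pvAddKeys
  rw [pv_match_iff]
  by_cases h0 : pvNormB c = ""
  · simp [h0]
  · have hnil : (pvNormB c).toList ≠ [] := by
      intro h; exact h0 (String.toList_inj.mp (by simpa using h))
    rw [if_neg h0, pv_mem_inner]
    simp only [PySem.Set.mem_add, PySem.List.mem_enumerate_iff]
    constructor
    · rintro ((hq | rfl) | ⟨ic, ⟨k, hk, rfl⟩, hc, hq⟩)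
      · exact Or.inl hq
      · refine Or.inr ⟨hnil, (pv_cand_core _ _).mp (Or.inl rfl)⟩
      · refine Or.inr ⟨hnil, (pv_cand_core _ _).mp (Or.inr ⟨k, hk, hc, ?_⟩)⟩
        simpa using (pv_slice_eq (pvNormB c) q k).mp (by simpa using hq)
    · rintro (hq | ⟨-, hcand⟩)
      · exact Or.inl (Or.inl hq)
      · rcases (pv_cand_core (pvNormB c).toList q.toList).mpr hcand with heq | ⟨k, hk, hc, htake⟩
        · exact Or.inl (Or.inr (String.toList_inj.mp heq))
        · refine Or.inr ⟨((0 : Int) + k, (pvNormB c).toList[k]), ⟨k, hk, rfl⟩, hc, ?_⟩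
          simpa using (pv_slice_eq (pvNormB c) q k).mpr htake

-- membership in the whole key set
theorem pv_mem_keys (changed : List String) (s : PySem.Set String) (q : String) :
    q ∈ changed.foldl pvAddKeys s ↔ q ∈ s ∨ ∃ c ∈ changed, pvPathMatchesSensitive c q = true := by
  induction changed generalizing s with
  | nil => simp
  | cons a l ih =>
    simp only [List.foldl_cons, ih, pv_mem_addKeys, List.mem_cons]
    constructor
    · rintro ((hq | hm) | ⟨c, hc, hm⟩)
      · exact Or.inl hq
      · exact Or.inr ⟨a, Or.inl rfl, hm⟩
      · exact Or.inr ⟨c, Or.inr hc, hm⟩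
    · rintro (hq | ⟨c, (rfl | hc), hm⟩)
      · exact Or.inl (Or.inl hq)
      · exact Or.inl (Or.inr hm)
      · exact Or.inr ⟨c, hc, hm⟩

theorem pv_eq (changed sensitive_patterns : List String) :
    any_sensitive_triggered_py changed sensitive_patterns
      = any_sensitive_triggered_py_alt changed sensitive_patterns := by
  unfold any_sensitive_triggered_py any_sensitive_triggered_py_alt
  rw [Bool.eq_iff_iff]
  simp only [List.any_eq_true, PySem.Set.contains, List.contains_eq_mem, decide_eq_true_eq,
    pv_mem_keys]
  constructor
  · rintro ⟨pat, hpat, ch, hch, hm⟩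
    exact ⟨pat, hpat, Or.inr ⟨ch, hch, hm⟩⟩
  · rintro ⟨pat, hpat, hmem | ⟨ch, hch, hm⟩⟩
    · exact absurd hmem (by simp [PySem.Set.empty])
    · exact ⟨pat, hpat, ch, hch, hm⟩

-- ===== VERDICT (by name: the statement is the Claim_ definition above) =====
theorem any_sensitive_triggered_py_spec : Claim_equal_any_sensitive_triggered_py := by
  intro changed sensitive_patterns _
  exact pv_eq changed sensitive_patterns
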